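-- pv_equiv track=rewrite | github.com/adgvkty/adgvkty | deeplearning_test/2.2.py | happy_b_day
-- ===== SOURCE A (Python) =====
-- from typing import Dict, List, Set, Tuple
--
-- def happy_b_day(a: List[int]) -> List[int]:
--     a.sort()  # сортируем список
--     temp = []
--     for i in range(len(a)):  # перебираем список
--         if i != len(a)-1:  # проверка чтобы не вылететь из массива (ибо элементов 25, но индекс последнего - 24)
--             if a[i] == a[i+1]:  # если предыдущий элемент равен следующему, то
--                 temp.append(a[i])  # закидываем во временный список
--     a = temp  # ну и делаем временного списка основной
--     return a
-- ===== SOURCE B (Python) =====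
-- def happy_b_day(a):
--     a.sort()  # same in-place sort as A
--     out = []
--     i = 0
--     n = len(a)
--     while i < n:
--         j = i + 1
--         while j < n and a[j] == a[i]:
--             j += 1
--         out += [a[i]] * (j - i - 1)  # count-1 copies of this run's value
--         i = j
--     return out
-- ===== Notes on version B (the rewrite author's own statement) =====
-- stated objective: alternative
-- what changed: Replaces A's per-index adjacent-pair scan over range(len(a)) with a run-grouping loop over the sorted list that skips each run of equal values and emits count-1 copies of its value.
import Mathlib
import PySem

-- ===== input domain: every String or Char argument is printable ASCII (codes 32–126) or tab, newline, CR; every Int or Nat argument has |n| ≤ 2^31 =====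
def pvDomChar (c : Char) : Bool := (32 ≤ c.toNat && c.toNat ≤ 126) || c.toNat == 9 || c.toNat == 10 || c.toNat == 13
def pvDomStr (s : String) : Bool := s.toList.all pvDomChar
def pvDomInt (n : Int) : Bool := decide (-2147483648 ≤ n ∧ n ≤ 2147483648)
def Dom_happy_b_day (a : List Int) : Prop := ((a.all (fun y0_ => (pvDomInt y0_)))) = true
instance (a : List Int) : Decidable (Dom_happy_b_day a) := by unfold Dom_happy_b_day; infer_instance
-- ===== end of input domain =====

-- B replaces A's adjacent-pair index scan with a run-grouping loop over the sorted list
-- (both Pythons sort the argument in place; the equivalence proved here is about the return value).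

-- ===== PORT A =====
-- a.sort(); for i in range(len(a)): if i != len(a)-1: if a[i] == a[i+1]: temp.append(a[i])
def happy_b_day (a : List Int) : List Int :=
  let s := PySem.List.sorted a (fun x => x) false
  let n : Int := (s.length : Int)
  (PySem.List.pyRange 0 n 1).foldl
    (fun temp i =>
      if i ≠ n - 1 then
        if PySem.List.pyGetD s i 0 == PySem.List.pyGetD s (i + 1) 0 then
          temp ++ [PySem.List.pyGetD s i 0]
        else temp
      else temp) []

-- ===== PORT B =====
-- outer while: one step per run of equal values; inner while = takeWhile/dropWhile scan of the run;
-- out += [a[i]] * (j - i - 1) = replicate (run length - 1).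
def runsLoop : List Int → List Int
  | [] => []
  | x :: t =>
    List.replicate (t.takeWhile (fun y => y == x)).length x
      ++ runsLoop (t.dropWhile (fun y => y == x))
termination_by l => l.length
decreasing_by
  exact Nat.lt_succ_of_le (t.length_dropWhile_le _)

def happy_b_day_alt (a : List Int) : List Int :=
  runsLoop (PySem.List.sorted a (fun x => x) false)

-- ===== PRECONDITION & SPEC =====
def Spec_happy_b_day (a : List Int) (out : List Int) : Prop := out = happy_b_day_alt a
instance (a : List Int) (out : List Int) : Decidable (Spec_happy_b_day a out) := by unfold Spec_happy_b_day; infer_instance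

-- ===== CLAIM (what is proved, stated in full; the proofs are below) =====
def Claim_equal_happy_b_day : Prop := ∀ (a : List Int), Dom_happy_b_day a → Spec_happy_b_day a (happy_b_day a)

-- ===== LEMMAS AND PROOFS =====

-- one step of the run loop, seen as one adjacent pair
theorem runsLoop_cons2 (x y : Int) (t : List Int) :
    runsLoop (x :: y :: t) = (if x == y then [x] else []) ++ runsLoop (y :: t) := by
  by_cases h : x = y
  · subst h
    rw [runsLoop, runsLoop]
    simp [List.takeWhile, List.dropWhile, List.replicate_succ]
  · have hyx : (y == x) = false := by simp [Ne.symm h]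
    rw [runsLoop]
    simp [List.takeWhile, List.dropWhile, hyx, h]

-- A's filtered index scan over any list equals B's run loop
theorem scan_eq_runsLoop : ∀ (s : List Int),
    ((List.range (s.length - 1)).filter
        (fun k => s.getD k 0 == s.getD (k + 1) 0)).map (fun k => s.getD k 0)
      = runsLoop s
  | [] => by simp [runsLoop]
  | [x] => by simp [runsLoop]
  | x :: y :: t => by
    have ih := scan_eq_runsLoop (y :: t)
    rw [runsLoop_cons2]
    have hlen : (x :: y :: t).length - 1 = (y :: t).length - 1 + 1 := by simp
    rw [hlen, List.range_succ_eq_map]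
    simp only [List.filter_cons, List.filter_map]
    have hshift : ∀ k : Nat,
        (x :: y :: t).getD (k + 1) 0 = (y :: t).getD k 0 := by intro k; rfl
    by_cases hxy : x = y
    · subst hxy
      simp only [List.getD_cons_zero, BEq.refl, if_pos]
      rw [← ih]
      simp [Function.comp_def]
    · have : ((x :: y :: t).getD 0 0 == (x :: y :: t).getD 1 0) = false := by
        simp [List.getD, hxy]
      simp only [this, Bool.false_eq_true, List.nil_append, beq_iff_eq, hxy, ite_false]
      rw [← ih]
      simp [Function.comp_def]

-- A's index fold over any list equals B's run loop
theorem foldA_eq : ∀ (s : List Int),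
    (PySem.List.pyRange 0 (s.length : Int) 1).foldl
      (fun temp i =>
        if i ≠ (s.length : Int) - 1 then
          if PySem.List.pyGetD s i 0 == PySem.List.pyGetD s (i + 1) 0 then
            temp ++ [PySem.List.pyGetD s i 0]
          else temp
        else temp) [] = runsLoop s := by
  intro s
  rcases s with _ | ⟨x, t⟩
  · simp [PySem.List.pyRange_one_eq_nil, runsLoop]
  · have hsplit : (((x :: t).length : Int)) = (t.length : Int) + 1 := by
      simp
    rw [hsplit, PySem.List.pyRange_one_succ_right (by positivity), List.foldl_append]
    simp only [List.foldl_cons, List.foldl_nil]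
    have hlast : ¬ ((t.length : Int) ≠ (t.length : Int) + 1 - 1) := by omega
    rw [if_neg hlast]
    rw [PySem.List.foldl_congr_mem _ _
      (fun temp i =>
        if PySem.List.pyGetD (x :: t) i 0 == PySem.List.pyGetD (x :: t) (i + 1) 0 then
          temp ++ [PySem.List.pyGetD (x :: t) i 0] else temp)
      _
      (by
        intro acc i hi
        have hm := (PySem.List.mem_pyRange_one).1 hi
        have hne : i ≠ (t.length : Int) + 1 - 1 := by omega
        rw [if_pos hne])]
    rw [PySem.List.foldl_append_if, PySem.List.pyRange_zero_natCast, List.filter_map,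
      List.map_map]
    simp only [Function.comp_def, ← Nat.cast_add_one, PySem.List.pyGetD_natCast]
    simpa using scan_eq_runsLoop (x :: t)

-- ===== VERDICT (by name: the statement is the Claim_ definition above) =====
theorem happy_b_day_spec : Claim_equal_happy_b_day := by
  intro a _
  show happy_b_day a = happy_b_day_alt a
  unfold happy_b_day happy_b_day_alt
  exact foldA_eq (PySem.List.sorted a (fun x => x) false)
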